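-- pv_equiv track=rewrite | github.com/huggingface/transformers | examples/run_seq2seq_finetuning.py | process_story
-- ===== SOURCE A (Python) =====
-- from collections import deque
--
-- def process_story(raw_story):
--     """ Extract the story and summary from a story file.
--
--     Attributes:
--         raw_story (str): content of the story file as an utf-8 encoded string.
--
--     Raises:
--         IndexError: If the stoy is empty or contains no highlights.
--     """
--     file_lines = list(
--         filter(lambda x: len(x) != 0, [line.strip() for line in raw_story.split("\n")])
--     )
--
--     # for some unknown reason some lines miss a period, add it
--     file_lines = [_add_missing_period(line) for line in file_lines]
--
--     # gather article lines
--     story_lines = []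
--     lines = deque(file_lines)
--     while True:
--         try:
--             element = lines.popleft()
--             if element.startswith("@highlight"):
--                 break
--             story_lines.append(element)
--         except IndexError as ie:  # if "@highlight" absent from file
--             raise ie
--
--     # gather summary lines
--     highlights_lines = list(filter(lambda t: not t.startswith("@highlight"), lines))
--
--     # join the lines
--     story = " ".join(story_lines)
--     summary = " ".join(highlights_lines)
--
--     return story, summary
--
-- def _add_missing_period(line):
--     END_TOKENS = [".", "!", "?", "...", "'", "`", '"', u"\u2019", u"\u2019", ")"]
--     if line.startswith("@highlight"):
--         return line
--     if line[-1] in END_TOKENS: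
--         return line
--     return line + "."
-- ===== SOURCE B (Python) =====
-- def process_story(raw_story):
--     """Extract the story and summary from a story file.
--
--     Raises IndexError if the story is empty or contains no '@highlight'.
--     """
--     file_lines = list(
--         filter(lambda x: len(x) != 0, [line.strip() for line in raw_story.split("\n")])
--     )
--     file_lines = [_add_missing_period(line) for line in file_lines]
--
--     # locate the first highlight marker; for-else raises when there is none
--     for i, line in enumerate(file_lines):
--         if line.startswith("@highlight"):
--             break
--     else:
--         raise IndexError("story is empty or contains no highlights")
--
--     story = " ".join(file_lines[:i])
--     summary = " ".join(t for t in file_lines[i + 1:] if not t.startswith("@highlight"))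
--     return story, summary
--
--
-- def _add_missing_period(line):
--     END_TOKENS = [".", "!", "?", "...", "'", "`", '"', u"\u2019", u"\u2019", ")"]
--     if line.startswith("@highlight"):
--         return line
--     if line[-1] in END_TOKENS:
--         return line
--     return line + "."
-- ===== Notes on version B (the rewrite author's own statement) =====
-- stated objective: simpler
-- what changed: Replaced the deque pop-loop that accumulates story lines and leaves a mutated remainder with a single index-finding scan (for/enumerate with for-else) followed by two slices of the line list; same preprocessing and joins.
import Mathlib
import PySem

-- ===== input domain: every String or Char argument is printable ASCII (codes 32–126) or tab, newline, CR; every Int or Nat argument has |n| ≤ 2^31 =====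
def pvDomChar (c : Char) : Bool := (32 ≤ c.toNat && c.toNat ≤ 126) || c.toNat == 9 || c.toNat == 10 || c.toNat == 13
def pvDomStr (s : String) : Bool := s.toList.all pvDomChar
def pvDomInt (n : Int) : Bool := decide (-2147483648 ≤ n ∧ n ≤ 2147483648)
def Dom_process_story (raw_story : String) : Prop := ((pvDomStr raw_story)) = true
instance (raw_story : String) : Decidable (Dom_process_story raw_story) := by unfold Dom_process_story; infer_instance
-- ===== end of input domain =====

-- B replaces A's deque pop-loop (accumulating story lines and leaving a mutated remainder)
-- with a single scan that finds the index of the first '@highlight' line and two slices; simpler.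

-- ===== PORT A =====

-- "@highlight" as a char list
def pvHl : List Char := "@highlight".toList

-- END_TOKENS of _add_missing_period (each Python element is a string)
def pvEndTokens : List (List Char) :=
  ["." , "!", "?", "...", "'", "`", "\"", "\u2019", "\u2019", ")"].map String.toList

-- _add_missing_period; the `none` branch of pyGet? (empty line, where Python would raise)
-- is unreachable: callers pass only nonempty lines.
def pvAddMissingPeriod (line : List Char) : List Char :=
  if PySem.Chars.startswith line pvHl then line
  else
    match PySem.List.pyGet? line (-1) with
    | none => line
    | some c => if pvEndTokens.contains [c] then line else line ++ ['.']

-- shared preprocessing (identical code in A and B): split, strip, drop empties, add periods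
def pvFileLines (raw_story : String) : List (List Char) :=
  (((PySem.Chars.splitOn raw_story.toList ['\n']).map PySem.Chars.strip).filter
      (fun l => !(l.length == 0))).map pvAddMissingPeriod

-- A's while/deque loop: popleft until a '@highlight' line; returns (story_lines, remaining deque),
-- none = the deque ran empty (Python raises IndexError there)
def pvALoop : List (List Char) → Option (List (List Char) × List (List Char))
  | [] => none
  | h :: t =>
      if PySem.Chars.startswith h pvHl then some ([], t)
      else (pvALoop t).map (fun p => (h :: p.1, p.2))

def process_story (raw_story : String) : String × String :=
  let file_lines := pvFileLines raw_story
  match pvALoop file_lines with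
  | none => ("", "")   -- Python raises IndexError here; excluded by Pre_
  | some (story_lines, lines) =>
      let highlights_lines := lines.filter (fun t => !(PySem.Chars.startswith t pvHl))
      (String.ofList (PySem.Chars.join [' '] story_lines),
       String.ofList (PySem.Chars.join [' '] highlights_lines))

-- ===== PORT B =====

-- B's for/enumerate scan: index of the first '@highlight' line, none = for-else raise
def pvFindHl : List (List Char) → Option Nat
  | [] => none
  | h :: t =>
      if PySem.Chars.startswith h pvHl then some 0
      else (pvFindHl t).map (· + 1)

def process_story_alt (raw_story : String) : String × String :=
  let file_lines := pvFileLines raw_story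
  match pvFindHl file_lines with
  | none => ("", "")   -- Python raises IndexError here; excluded by Pre_
  | some i =>
      (String.ofList (PySem.Chars.join [' '] (file_lines.take i)),
       String.ofList (PySem.Chars.join [' ']
         ((file_lines.drop (i + 1)).filter (fun t => !(PySem.Chars.startswith t pvHl)))))

-- ===== PRECONDITION & SPEC =====
-- Pre_ excludes exactly the inputs on which A raises IndexError: stories in which no
-- stripped line starts with "@highlight" (B raises there too).
def Pre_process_story (raw_story : String) : Prop :=
  ((PySem.Chars.splitOn raw_story.toList ['\n']).map PySem.Chars.strip).any
    (fun l => PySem.Chars.startswith l "@highlight".toList) = true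
instance (raw_story : String) : Decidable (Pre_process_story raw_story) := by
  unfold Pre_process_story; infer_instance

def pvWitness_process_story : String := "A story line.\n@highlight\na summary"

def Spec_process_story (raw_story : String) (out : String × String) : Prop :=
  out = process_story_alt raw_story
instance (raw_story : String) (out : String × String) : Decidable (Spec_process_story raw_story out) := by
  unfold Spec_process_story; infer_instance

-- ===== CLAIM (what is proved, stated in full; the proofs are below) =====
def Claim_equal_process_story : Prop :=
  ∀ (raw_story : String), Dom_process_story raw_story → Pre_process_story raw_story →
    Spec_process_story raw_story (process_story raw_story)

-- ===== LEMMAS AND PROOFS =====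

-- A's deque loop computes exactly B's (index, take, drop-after) decomposition
theorem pvALoop_eq_findHl (ls : List (List Char)) :
    pvALoop ls = (pvFindHl ls).map (fun i => (ls.take i, ls.drop (i + 1))) := by
  induction ls with
  | nil => rfl
  | cons h t ih =>
      simp only [pvALoop, pvFindHl]
      split
      · rfl
      · rw [ih]
        cases pvFindHl t <;> simp

-- ===== VERDICT (by name: the statement is the Claim_ definition above) =====
theorem process_story_spec : Claim_equal_process_story := by
  intro raw_story _ _
  unfold Spec_process_story
  simp only [process_story, process_story_alt, pvALoop_eq_findHl]
  cases pvFindHl (pvFileLines raw_story) <;> simp
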